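-- pv_equiv track=rewrite | github.com/ambrosekuo/aoc-2024 | aoc-python/day22/main2.py | get_highest_banana_sum
-- ===== SOURCE A (Python) =====
-- def get_highest_banana_sum(secret_numbers_to_sequences_bananas_mapping, all_sequences_encounters):
--     highest_banana_sequence = 0
--     for sequence_key in all_sequences_encounters:
--         total_banana_count_for_sequence = 0
--         for secret_number_max_banana_mapping in secret_numbers_to_sequences_bananas_mapping:
--             if secret_number_max_banana_mapping.get(sequence_key):
--                 total_banana_count_for_sequence += secret_number_max_banana_mapping[sequence_key]
--         if total_banana_count_for_sequence > highest_banana_sequence: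
--             highest_banana_sequence = total_banana_count_for_sequence
--
--     return highest_banana_sequence
-- ===== SOURCE B (Python) =====
-- def get_highest_banana_sum(secret_numbers_to_sequences_bananas_mapping, all_sequences_encounters):
--     wanted = set(all_sequences_encounters)
--     totals = {}
--     for mapping in secret_numbers_to_sequences_bananas_mapping:
--         for key, bananas in mapping.items():
--             if key in wanted:
--                 totals[key] = totals.get(key, 0) + bananas
--     best = 0
--     for total in totals.values():
--         if total > best:
--             best = total
--     return best
-- ===== Notes on version B (the rewrite author's own statement) =====
-- stated objective: faster
-- what changed: Inverts the loop nesting: instead of rescanning every buyer's dict for each sequence (len(encounters) full passes over all dicts), B makes one pass over the buyers' dicts accumulating per-sequence totals into a hash table, then takes the max of the table's values floored at 0.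
import Mathlib
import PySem

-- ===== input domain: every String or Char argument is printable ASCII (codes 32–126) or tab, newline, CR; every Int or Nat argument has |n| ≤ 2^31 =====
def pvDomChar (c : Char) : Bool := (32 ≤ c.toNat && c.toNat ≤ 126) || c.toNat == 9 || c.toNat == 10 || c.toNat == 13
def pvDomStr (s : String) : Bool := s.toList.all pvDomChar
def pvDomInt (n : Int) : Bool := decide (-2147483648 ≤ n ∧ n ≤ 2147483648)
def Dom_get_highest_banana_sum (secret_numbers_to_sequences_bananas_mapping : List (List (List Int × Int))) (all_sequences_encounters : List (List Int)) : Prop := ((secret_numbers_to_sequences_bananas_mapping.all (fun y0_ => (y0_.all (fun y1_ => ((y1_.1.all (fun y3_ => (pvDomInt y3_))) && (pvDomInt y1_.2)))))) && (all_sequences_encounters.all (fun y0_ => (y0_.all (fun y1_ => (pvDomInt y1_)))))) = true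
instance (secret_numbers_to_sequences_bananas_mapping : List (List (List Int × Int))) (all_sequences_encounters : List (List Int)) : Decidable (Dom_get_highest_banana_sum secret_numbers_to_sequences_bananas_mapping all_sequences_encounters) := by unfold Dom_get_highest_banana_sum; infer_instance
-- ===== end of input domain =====

-- B inverts the loop nesting: one pass over the buyers' dicts accumulating per-sequence totals
-- into a table keyed by sequence, then the max of the table's values floored at 0 (objective: faster).

-- ===== PORT A =====
def get_highest_banana_sum (secret_numbers_to_sequences_bananas_mapping : List (List (List Int × Int))) (all_sequences_encounters : List (List Int)) : Int :=
  all_sequences_encounters.foldl (fun highest_banana_sequence sequence_key =>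
    let total_banana_count_for_sequence :=
      secret_numbers_to_sequences_bananas_mapping.foldl (fun total m =>
        match (PySem.Dict.mk m).get? sequence_key with
        | some v => if v ≠ 0 then total + v else total   -- `if m.get(k):` — truthy = present and nonzero
        | none => total) 0
    if total_banana_count_for_sequence > highest_banana_sequence then total_banana_count_for_sequence
    else highest_banana_sequence) 0

-- ===== PORT B =====
def get_highest_banana_sum_alt (secret_numbers_to_sequences_bananas_mapping : List (List (List Int × Int))) (all_sequences_encounters : List (List Int)) : Int :=
  let wanted := PySem.Set.ofList all_sequences_encounters
  let totals := secret_numbers_to_sequences_bananas_mapping.foldl (fun totals mapping =>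
      mapping.foldl (fun totals kv =>
        if kv.1 ∈ wanted then totals.insert kv.1 (totals.getD kv.1 0 + kv.2) else totals) totals)
    PySem.Dict.empty
  totals.values.foldl (fun best total => if total > best then total else best) 0

-- ===== PRECONDITION & SPEC =====
-- Pre_ requires each association list to have distinct keys: a mapping with duplicate keys does not
-- represent any Python dict (dict construction collapses duplicates), so no Python input is excluded.
def Pre_get_highest_banana_sum (secret_numbers_to_sequences_bananas_mapping : List (List (List Int × Int))) (all_sequences_encounters : List (List Int)) : Prop :=
  ∀ m ∈ secret_numbers_to_sequences_bananas_mapping, (m.map Prod.fst).Nodup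
instance (secret_numbers_to_sequences_bananas_mapping : List (List (List Int × Int))) (all_sequences_encounters : List (List Int)) : Decidable (Pre_get_highest_banana_sum secret_numbers_to_sequences_bananas_mapping all_sequences_encounters) := by unfold Pre_get_highest_banana_sum; infer_instance
def pvWitness_get_highest_banana_sum : (List (List (List Int × Int))) × List (List Int) :=
  ([[([1, 2], 3), ([0], 4)], [([1, 2], 5)]], [[1, 2], [7]])

def Spec_get_highest_banana_sum (secret_numbers_to_sequences_bananas_mapping : List (List (List Int × Int))) (all_sequences_encounters : List (List Int)) (out : Int) : Prop := out = get_highest_banana_sum_alt secret_numbers_to_sequences_bananas_mapping all_sequences_encounters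
instance (secret_numbers_to_sequences_bananas_mapping : List (List (List Int × Int))) (all_sequences_encounters : List (List Int)) (out : Int) : Decidable (Spec_get_highest_banana_sum secret_numbers_to_sequences_bananas_mapping all_sequences_encounters out) := by unfold Spec_get_highest_banana_sum; infer_instance

-- ===== CLAIM (what is proved, stated in full; the proofs are below) =====
def Claim_equal_get_highest_banana_sum : Prop := ∀ (secret_numbers_to_sequences_bananas_mapping : List (List (List Int × Int))) (all_sequences_encounters : List (List Int)), Dom_get_highest_banana_sum secret_numbers_to_sequences_bananas_mapping all_sequences_encounters → Pre_get_highest_banana_sum secret_numbers_to_sequences_bananas_mapping all_sequences_encounters → Spec_get_highest_banana_sum secret_numbers_to_sequences_bananas_mapping all_sequences_encounters (get_highest_banana_sum secret_numbers_to_sequences_bananas_mapping all_sequences_encounters)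

-- ===== LEMMAS AND PROOFS =====

-- per-sequence total a single mapping contributes (sum of the values stored under key k)
def pvC (m : List (List Int × Int)) (k : List Int) : Int :=
  (m.map (fun p => if p.1 = k then p.2 else 0)).sum

-- per-sequence total over all mappings, as A computes it (first-match lookup per dict)
def pvS (maps : List (List (List Int × Int))) (k : List Int) : Int :=
  (maps.map (fun m => (PySem.Dict.mk m).getD k 0)).sum

lemma pvA_inner (maps : List (List (List Int × Int))) (k : List Int) (t : Int) :
    maps.foldl (fun total m =>
        match (PySem.Dict.mk m).get? k with
        | some v => if v ≠ 0 then total + v else total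
        | none => total) t = t + pvS maps k := by
  induction maps generalizing t with
  | nil => simp [pvS]
  | cons m rest ih =>
    simp only [pvS, List.map_cons, List.sum_cons] at ih ⊢
    simp only [List.foldl_cons]
    rw [ih]
    rcases h : (PySem.Dict.mk m).get? k with _ | v
    · simp only [PySem.Dict.getD_eq_get?_getD, h, Option.getD_none]
      ring
    · by_cases hv : v = 0
      · simp only [PySem.Dict.getD_eq_get?_getD, h, Option.getD_some, hv, ne_eq,
          not_true_eq_false, if_false]
        ring
      · simp only [PySem.Dict.getD_eq_get?_getD, h, Option.getD_some, ne_eq, hv,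
          not_false_eq_true, if_true]
        ring

lemma pvC_of_not_mem (m : List (List Int × Int)) (k : List Int) (h : k ∉ m.map Prod.fst) :
    pvC m k = 0 := by
  induction m with
  | nil => simp [pvC]
  | cons p rest ih =>
    simp only [List.map_cons, List.mem_cons, not_or] at h
    simp [pvC, List.map_cons, List.sum_cons, Ne.symm h.1] at *
    exact ih h.2

lemma pvC_eq_getD (m : List (List Int × Int)) (k : List Int) (hnd : (m.map Prod.fst).Nodup) :
    pvC m k = (PySem.Dict.mk m).getD k 0 := by
  induction m with
  | nil => simp [pvC, PySem.Dict.getD_eq_get?_getD, PySem.Dict.get?]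
  | cons p rest ih =>
    simp only [List.map_cons, List.nodup_cons] at hnd
    rw [PySem.Dict.getD_eq_get?_getD, PySem.Dict.get?_mk_cons]
    by_cases hk : p.1 = k
    · have h0 : pvC rest k = 0 := pvC_of_not_mem rest k (hk ▸ hnd.1)
      simp only [pvC, List.map_cons, List.sum_cons, if_pos hk, beq_iff_eq.2 hk, if_true,
        Option.getD_some]
      simp only [pvC] at h0
      simp [h0]
    · simp only [pvC, List.map_cons, List.sum_cons, if_neg hk, beq_false_of_ne hk,
        Bool.false_eq_true, if_false]
      rw [← PySem.Dict.getD_eq_get?_getD, ← ih hnd.2]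
      simp [pvC]

-- B's inner loop: effect on the running total stored under k
lemma pvB_inner (encs : List (List Int)) (m : List (List Int × Int)) (d : PySem.Dict (List Int) Int) (k : List Int) :
    (m.foldl (fun totals kv =>
        if kv.1 ∈ PySem.Set.ofList encs then totals.insert kv.1 (totals.getD kv.1 0 + kv.2) else totals) d).getD k 0
      = d.getD k 0 + if k ∈ encs then pvC m k else 0 := by
  induction m generalizing d with
  | nil => simp [pvC]
  | cons p rest ih =>
    simp only [List.foldl_cons]
    by_cases hp : p.1 ∈ PySem.Set.ofList encs
    · rw [if_pos hp, ih]
      rw [PySem.Dict.getD_insert]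
      by_cases hk : k = p.1
      · rw [hk]
        have hke : p.1 ∈ encs := (PySem.Set.mem_ofList encs p.1).1 hp
        simp only [pvC, List.map_cons, List.sum_cons, if_pos hke, if_true]
        ring
      · have hpk : p.1 ≠ k := fun h => hk h.symm
        simp only [if_neg hk, pvC, List.map_cons, List.sum_cons, if_neg hpk, zero_add]
    · rw [if_neg hp, ih]
      by_cases hk : k = p.1
      · have hke : k ∉ encs := fun h => hp ((PySem.Set.mem_ofList encs p.1).2 (hk ▸ h))
        simp [hke]
      · have hpk : p.1 ≠ k := fun h => hk h.symm
        simp only [pvC, List.map_cons, List.sum_cons, if_neg hpk, zero_add]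

-- B's outer loop: the table holds, under each wanted key, the sum of pvC over all mappings
lemma pvB_outer (encs : List (List Int)) (maps : List (List (List Int × Int))) (d : PySem.Dict (List Int) Int) (k : List Int) :
    (maps.foldl (fun totals mapping =>
        mapping.foldl (fun totals kv =>
          if kv.1 ∈ PySem.Set.ofList encs then totals.insert kv.1 (totals.getD kv.1 0 + kv.2) else totals) totals) d).getD k 0
      = d.getD k 0 + if k ∈ encs then (maps.map (fun m => pvC m k)).sum else 0 := by
  induction maps generalizing d with
  | nil => simp
  | cons m rest ih =>
    simp only [List.foldl_cons]
    rw [ih, pvB_inner]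
    by_cases hk : k ∈ encs <;> simp [hk] <;> ring

-- every key of the table was seen in the encounter list
lemma pvB_keys_inner (encs : List (List Int)) (m : List (List Int × Int)) (d : PySem.Dict (List Int) Int) (k : List Int)
    (h : k ∈ (m.foldl (fun totals kv =>
        if kv.1 ∈ PySem.Set.ofList encs then totals.insert kv.1 (totals.getD kv.1 0 + kv.2) else totals) d).keys) :
    k ∈ d.keys ∨ k ∈ encs := by
  induction m generalizing d with
  | nil => exact Or.inl h
  | cons p rest ih =>
    simp only [List.foldl_cons] at h
    by_cases hp : p.1 ∈ PySem.Set.ofList encs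
    · rw [if_pos hp] at h
      rcases ih _ h with h' | h'
      · rcases (PySem.Dict.mem_keys_insert _ _ _ _).1 h' with h'' | h''
        · exact Or.inr (h'' ▸ (PySem.Set.mem_ofList encs p.1).1 hp)
        · exact Or.inl h''
      · exact Or.inr h'
    · rw [if_neg hp] at h
      exact ih _ h

lemma pvB_keys_outer (encs : List (List Int)) (maps : List (List (List Int × Int))) (d : PySem.Dict (List Int) Int) (k : List Int)
    (h : k ∈ (maps.foldl (fun totals mapping =>
        mapping.foldl (fun totals kv =>
          if kv.1 ∈ PySem.Set.ofList encs then totals.insert kv.1 (totals.getD kv.1 0 + kv.2) else totals) totals) d).keys) :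
    k ∈ d.keys ∨ k ∈ encs := by
  induction maps generalizing d with
  | nil => exact Or.inl h
  | cons m rest ih =>
    simp only [List.foldl_cons] at h
    rcases ih _ h with h' | h'
    · exact pvB_keys_inner encs m d k h'
    · exact Or.inr h'

lemma pvB_nodup_inner (encs : List (List Int)) (m : List (List Int × Int)) (d : PySem.Dict (List Int) Int)
    (h : d.keys.Nodup) :
    (m.foldl (fun totals kv =>
        if kv.1 ∈ PySem.Set.ofList encs then totals.insert kv.1 (totals.getD kv.1 0 + kv.2) else totals) d).keys.Nodup := by
  induction m generalizing d with
  | nil => exact h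
  | cons p rest ih =>
    simp only [List.foldl_cons]
    by_cases hp : p.1 ∈ PySem.Set.ofList encs
    · rw [if_pos hp]; exact ih _ (PySem.Dict.nodup_keys_insert _ _ _ h)
    · rw [if_neg hp]; exact ih _ h

lemma pvB_nodup_outer (encs : List (List Int)) (maps : List (List (List Int × Int))) (d : PySem.Dict (List Int) Int)
    (h : d.keys.Nodup) :
    (maps.foldl (fun totals mapping =>
        mapping.foldl (fun totals kv =>
          if kv.1 ∈ PySem.Set.ofList encs then totals.insert kv.1 (totals.getD kv.1 0 + kv.2) else totals) totals) d).keys.Nodup := by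
  induction maps generalizing d with
  | nil => exact h
  | cons m rest ih => exact ih _ (pvB_nodup_inner encs m d h)

-- if-max folds are max folds
lemma pv_foldl_if_eq_max (f : List Int → Int) (l : List (List Int)) (a : Int) :
    l.foldl (fun h k => if f k > h then f k else h) a = l.foldl (fun h k => max h (f k)) a := by
  induction l generalizing a with
  | nil => rfl
  | cons x rest ih =>
    simp only [List.foldl_cons, ih]
    congr 1
    rcases le_or_gt (f x) a with h | h
    · simp [not_lt.2 h, max_eq_left h]
    · simp [h, max_eq_right (le_of_lt h)]

lemma pv_foldl_max_le (l : List Int) : ∀ (a c : Int), a ≤ c → (∀ x ∈ l, x ≤ c) → l.foldl max a ≤ c := by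
  induction l with
  | nil => intro a c ha _; exact ha
  | cons x rest ih =>
    intro a c ha h
    exact ih _ _ (max_le ha (h x List.mem_cons_self)) (fun y hy => h y (List.mem_cons_of_mem _ hy))

-- ===== VERDICT (by name: the statement is the Claim_ definition above) =====
theorem get_highest_banana_sum_spec : Claim_equal_get_highest_banana_sum := by
  intro maps encs _dom hpre
  unfold Spec_get_highest_banana_sum get_highest_banana_sum get_highest_banana_sum_alt
  -- rewrite A to a max-fold over pvS
  have hA : ∀ k, (maps.foldl (fun total m =>
      match (PySem.Dict.mk m).get? k with
      | some v => if v ≠ 0 then total + v else total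
      | none => total) 0) = pvS maps k := fun k => by rw [pvA_inner]; ring
  simp only [hA]
  rw [pv_foldl_if_eq_max (pvS maps) encs 0, ← List.foldl_map (f := pvS maps) (g := max)]
  set totals := maps.foldl (fun totals mapping =>
      mapping.foldl (fun totals kv =>
        if kv.1 ∈ PySem.Set.ofList encs then totals.insert kv.1 (totals.getD kv.1 0 + kv.2) else totals) totals)
    PySem.Dict.empty with htotals
  have hval : ∀ k ∈ encs, totals.getD k 0 = pvS maps k := by
    intro k hk
    rw [htotals, pvB_outer, if_pos hk]
    have : ∀ m ∈ maps, pvC m k = (PySem.Dict.mk m).getD k 0 := fun m hm => pvC_eq_getD m k (hpre m hm)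
    simp only [PySem.Dict.getD_empty, zero_add, pvS]
    exact congrArg List.sum (List.map_congr_left this)
  have hnd : totals.keys.Nodup := pvB_nodup_outer encs maps PySem.Dict.empty (by simp [PySem.Dict.keys_empty])
  have hkeys : ∀ k ∈ totals.keys, k ∈ encs := by
    intro k hk
    rcases pvB_keys_outer encs maps PySem.Dict.empty k (htotals ▸ hk) with h | h
    · simp [PySem.Dict.keys_empty] at h
    · exact h
  have hvalues : totals.values = totals.keys.map (fun k => totals.getD k 0) :=
    PySem.Dict.values_eq_map_keys totals hnd 0
  -- rewrite B's final loop to a max-fold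
  have hBmax : totals.values.foldl (fun best total => if total > best then total else best) 0
      = totals.values.foldl max 0 := by
    induction totals.values using List.reverseRecOn with
    | nil => rfl
    | append_singleton xs x ih =>
      simp only [List.foldl_append, List.foldl_cons, List.foldl_nil, ih]
      rcases le_or_gt x (xs.foldl max 0) with h | h
      · simp [not_lt.2 h, max_eq_left h]
      · simp [h, max_eq_right (le_of_lt h)]
  rw [hBmax]
  -- A-value = max over encs of pvS; B-value = max over table values; show equal
  apply le_antisymm
  · apply pv_foldl_max_le
    · exact (PySem.List.le_foldl_max totals.values 0).1
    · intro x hx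
      rcases List.mem_map.1 hx with ⟨k, hk, rfl⟩
      by_cases hmem : k ∈ totals.keys
      · have : pvS maps k ∈ totals.values := by
          rw [hvalues]
          exact hval k (hkeys k hmem) ▸ List.mem_map_of_mem hmem
        exact (PySem.List.le_foldl_max totals.values 0).2 _ this
      · have h0 : totals.getD k 0 = 0 :=
          PySem.Dict.getD_of_not_contains totals 0
            (by rw [← Bool.not_eq_true]; exact fun hc => hmem ((PySem.Dict.contains_iff_mem_keys totals k).1 hc))
        rw [← hval k hk, h0]
        exact (PySem.List.le_foldl_max totals.values 0).1
  · apply pv_foldl_max_le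
    · exact (PySem.List.le_foldl_max _ 0).1
    · intro x hx
      rw [hvalues] at hx
      rcases List.mem_map.1 hx with ⟨k, hk, rfl⟩
      have hke := hkeys k hk
      rw [hval k hke]
      exact (PySem.List.le_foldl_max _ 0).2 _ (List.mem_map_of_mem hke)
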